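-- pv_equiv track=rewrite | github.com/AlanWalker91/python-algorithms-and-learning | algorithms/哈希/最长连续序列.py | longestStr
-- ===== SOURCE A (Python) =====
-- def longestStr(strs):
--     str_set = set()
--     longest = 0
--
--     for st in strs:
--         str_set.add(ord(st))
--
--     for i in str_set:
--         if i - 1 not in str_set:
--             current = i
--             current_length = 1
--
--             while current + 1 in str_set:
--                 current += 1
--                 current_length += 1
--
--             longest = max(longest, current_length)
--     return longest
-- ===== SOURCE B (Python) =====
-- def longestStr(strs):
--     vals = sorted({ord(st) for st in strs})
--     best = 0
--     cur = 0
--     prev = None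
--     for v in vals:
--         cur = cur + 1 if prev is not None and v == prev + 1 else 1
--         if cur > best:
--             best = cur
--         prev = v
--     return best
-- ===== Notes on version B (the rewrite author's own statement) =====
-- stated objective: idiomatic
-- what changed: replaces the probe-neighbours-in-set traversal (inner while loop extending each run start) by sorting the deduplicated code points once and scanning them left to right with a running run length
import Mathlib
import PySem

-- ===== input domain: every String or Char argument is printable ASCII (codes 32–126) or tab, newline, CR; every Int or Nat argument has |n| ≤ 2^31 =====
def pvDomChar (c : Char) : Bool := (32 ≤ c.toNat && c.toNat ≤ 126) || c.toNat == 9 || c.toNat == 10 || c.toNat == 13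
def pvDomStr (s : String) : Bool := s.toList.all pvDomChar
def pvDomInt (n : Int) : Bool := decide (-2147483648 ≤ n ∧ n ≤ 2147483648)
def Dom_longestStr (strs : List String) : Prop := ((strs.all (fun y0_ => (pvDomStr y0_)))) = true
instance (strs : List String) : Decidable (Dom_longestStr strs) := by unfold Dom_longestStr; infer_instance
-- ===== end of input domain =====

-- B sorts the deduplicated code points once and scans them with a running run length (idiomatic rewrite; same cost class).


-- ===== PORT A =====
-- ord(st): exact for single-character strings (guaranteed by Pre_); Python raises TypeError otherwise.
def pyOrd (st : String) : Int :=
  match st.toList with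
  | [c] => (c.toNat : Int)
  | _ => 0

-- the 'while current + 1 in str_set' loop; fuel = size of the set is always sufficient
-- (the visited values are distinct members of the set), see whileA_spec below.
def whileA (s : PySem.Set Int) : Nat → Int → Int → Int × Int
  | 0, current, len => (current, len)
  | fuel + 1, current, len =>
    if (current + 1) ∈ s then whileA s fuel (current + 1) (len + 1) else (current, len)

def longestStr (strs : List String) : Int :=
  let str_set : PySem.Set Int := strs.foldl (fun s st => PySem.Set.add s (pyOrd st)) PySem.Set.empty
  str_set.foldl (fun longest i =>
    if (i - 1) ∉ str_set then max longest (whileA str_set str_set.length i 1).2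
    else longest) 0

-- ===== PORT B =====
-- state = (best, cur, prev)
def scanStep (st : Int × Int × Option Int) (v : Int) : Int × Int × Option Int :=
  let cur : Int :=
    match st.2.2 with
    | some p => if v = p + 1 then st.2.1 + 1 else 1
    | none => 1
  let best := if cur > st.1 then cur else st.1
  (best, cur, some v)

def longestStr_alt (strs : List String) : Int :=
  let vals := PySem.List.sorted (PySem.Set.ofList (strs.map pyOrd)) (fun x => x) false
  (vals.foldl scanStep (0, 0, none)).1

-- ===== PRECONDITION & SPEC =====
-- Pre_ excludes exactly the inputs on which Python's ord — hence A — raises TypeError: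
-- lists containing a string whose length is not 1.
def Pre_longestStr (strs : List String) : Prop := ∀ s ∈ strs, s.toList.length = 1
instance (strs : List String) : Decidable (Pre_longestStr strs) := by unfold Pre_longestStr; infer_instance
def pvWitness_longestStr : List String := ["a", "c", "b", "x"]

def Spec_longestStr (strs : List String) (out : Int) : Prop := out = longestStr_alt strs
instance (strs : List String) (out : Int) : Decidable (Spec_longestStr strs out) := by unfold Spec_longestStr; infer_instance

-- ===== CLAIM (what is proved, stated in full; the proofs are below) =====
def Claim_equal_longestStr : Prop := ∀ (strs : List String), Dom_longestStr strs → Pre_longestStr strs → Spec_longestStr strs (longestStr strs)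

-- ===== LEMMAS AND PROOFS =====

-- a block of k consecutive integers starting at a
def block : Int → Nat → List Int
  | _, 0 => []
  | a, k + 1 => a :: block (a + 1) k

lemma mem_block (k : Nat) : ∀ (a y : Int), y ∈ block a k ↔ a ≤ y ∧ y < a + k := by
  induction k with
  | zero => intro a y; simp [block]
  | succ k ih =>
    intro a y
    simp only [block, List.mem_cons, ih]
    push_cast
    omega

-- the while loop always stops: some cur + k + 1 is outside the finite list
lemma exists_stop (s : List Int) (cur : Int) : ∃ k : Nat, (cur + k + 1) ∉ s := by
  by_contra h
  push Not at h
  have hnd : ((List.range (s.length + 1)).map (fun j : Nat => cur + j + 1)).Nodup := by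
    refine List.Nodup.map ?_ (List.nodup_range)
    intro a b hab
    simpa using hab
  have hsub : ((List.range (s.length + 1)).map (fun j : Nat => cur + j + 1)) ⊆ s := by
    intro x hx
    simp only [List.mem_map, List.mem_range] at hx
    obtain ⟨j, _, rfl⟩ := hx
    exact h j
  have := (List.subperm_of_subset hnd hsub).length_le
  simp at this

-- length of the consecutive run above cur inside s (number of successful while-steps)
def runLen (s : List Int) (cur : Int) : Nat := Nat.find (exists_stop s cur)

lemma runLen_notMem (s : List Int) (cur : Int) : (cur + runLen s cur + 1) ∉ s :=
  Nat.find_spec (exists_stop s cur)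

lemma runLen_mem (s : List Int) (cur : Int) {j : Nat} (h1 : 1 ≤ j) (h2 : j ≤ runLen s cur) :
    (cur + j) ∈ s := by
  have hlt : j - 1 < runLen s cur := by omega
  have := Nat.find_min (exists_stop s cur) hlt
  simp only [not_not] at this
  have hj : (cur + (j - 1 : Nat) + 1 : Int) = cur + j := by
    have : ((j - 1 : Nat) : Int) = (j : Int) - 1 := by omega
    rw [this]; ring
  rwa [hj] at this

lemma runLen_eq_of {s : List Int} {cur : Int} {m : Nat}
    (hmem : ∀ j : Nat, 1 ≤ j → j ≤ m → (cur + j) ∈ s) (hnot : (cur + m + 1) ∉ s) :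
    runLen s cur = m := by
  refine le_antisymm (Nat.find_min' _ hnot) ?_
  by_contra hlt
  push Not at hlt
  have hmem' := hmem (runLen s cur + 1) (by omega) (by omega)
  have : (cur + (runLen s cur + 1 : Nat) : Int) = cur + runLen s cur + 1 := by push_cast; ring
  rw [this] at hmem'
  exact runLen_notMem s cur hmem'

lemma runLen_congr {s t : List Int} (h : ∀ x : Int, x ∈ s ↔ x ∈ t) (cur : Int) :
    runLen s cur = runLen t cur := by
  refine runLen_eq_of ?_ ?_
  · intro j h1 h2
    exact (h _).mpr (runLen_mem t cur h1 h2)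
  · intro hmem
    exact runLen_notMem t cur ((h _).mp hmem)

lemma runLen_le_length (s : List Int) (cur : Int) : runLen s cur ≤ s.length := by
  have hnd : ((List.range (runLen s cur)).map (fun j : Nat => cur + j + 1)).Nodup := by
    refine List.Nodup.map ?_ (List.nodup_range)
    intro a b hab
    simpa using hab
  have hsub : ((List.range (runLen s cur)).map (fun j : Nat => cur + j + 1)) ⊆ s := by
    intro x hx
    simp only [List.mem_map, List.mem_range] at hx
    obtain ⟨j, hj, rfl⟩ := hx
    have := runLen_mem s cur (j := j + 1) (by omega) (by omega)
    have hc : (cur + (j + 1 : Nat) : Int) = cur + j + 1 := by push_cast; ring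
    rwa [hc] at this
  have := (List.subperm_of_subset hnd hsub).length_le
  simpa using this

lemma whileA_spec (s : List Int) (m : Nat) :
    ∀ (cur : Int) (fuel : Nat) (len : Int),
      (∀ j : Nat, 1 ≤ j → j ≤ m → (cur + j) ∈ s) → (cur + m + 1) ∉ s → m ≤ fuel →
      (whileA s fuel cur len).2 = len + m := by
  induction m with
  | zero =>
    intro cur fuel len hmem hnot _
    have hnot1 : (cur + 1) ∉ s := by simpa using hnot
    cases fuel with
    | zero => simp [whileA]
    | succ f => simp [whileA, hnot1]
  | succ m ih =>
    intro cur fuel len hmem hnot hfuel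
    cases fuel with
    | zero => omega
    | succ f =>
      have h1 : (cur + 1) ∈ s := by simpa using hmem 1 (by omega) (by omega)
      have hres : (whileA s (f + 1) cur len) = whileA s f (cur + 1) (len + 1) := by
        simp [whileA, h1]
      rw [hres]
      have := ih (cur + 1) f (len + 1)
        (by
          intro j hj1 hj2
          have := hmem (j + 1) (by omega) (by omega)
          have hc : (cur + (j + 1 : Nat) : Int) = cur + 1 + j := by push_cast; ring
          rwa [hc] at this)
        (by
          have hc : (cur + 1 + m + 1 : Int) = cur + (m + 1 : Nat) + 1 := by push_cast; ring
          rw [hc]; exact hnot)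
        (by omega)
      rw [this]
      push_cast
      ring

-- A's loop body, with the while loop replaced by its value
def stepA (s : List Int) (acc i : Int) : Int :=
  if (i - 1) ∉ s then max acc (1 + (runLen s i : Int)) else acc

lemma stepA_perm {s : List Int} {l₁ l₂ : List Int} (h : l₁.Perm l₂) :
    ∀ b : Int, l₁.foldl (stepA s) b = l₂.foldl (stepA s) b := by
  induction h with
  | nil => intro b; rfl
  | cons x _ ih => intro b; simp only [List.foldl_cons]; exact ih _
  | swap x y l =>
    intro b
    simp only [List.foldl_cons]
    congr 1
    unfold stepA
    split_ifs <;> first | rfl | rw [max_right_comm]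
  | trans _ _ ih1 ih2 => intro b; rw [ih1, ih2]

lemma stepA_maxPull (s : List Int) (l : List Int) :
    ∀ (x y : Int), l.foldl (stepA s) (max x y) = max x (l.foldl (stepA s) y) := by
  induction l with
  | nil => intro x y; rfl
  | cons i t ih =>
    intro x y
    simp only [List.foldl_cons]
    have hstep : stepA s (max x y) i = max x (stepA s y i) := by
      unfold stepA
      split_ifs <;> first | rfl | rw [max_assoc]
    rw [hstep, ih]

lemma if_gt_eq_max (b c : Int) : (if c > b then c else b) = max b c := by
  rw [max_def]; split_ifs <;> omega

lemma scan_block (k : Nat) :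
    ∀ (tail : List Int) (b c p : Int), c ≤ b →
      (block (p + 1) k ++ tail).foldl scanStep (b, c, some p)
        = tail.foldl scanStep (max b (c + k), c + k, some (p + k)) := by
  induction k with
  | zero =>
    intro tail b c p hcb
    simp [block, max_eq_left hcb]
  | succ k ih =>
    intro tail b c p hcb
    have hstep : scanStep (b, c, some p) (p + 1) = (max b (c + 1), c + 1, some (p + 1)) := by
      simp [scanStep]
      split_ifs with h
      · exact (max_eq_right (by omega)).symm
      · exact (max_eq_left (by omega)).symm
    have hblk : block (p + 1) (k + 1) ++ tail = (p + 1) :: (block (p + 1 + 1) k ++ tail) := by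
      simp [block]
    rw [hblk, List.foldl_cons, hstep, ih tail (max b (c + 1)) (c + 1) (p + 1) (le_max_right _ _)]
    have h1 : max (max b (c + 1)) (c + 1 + k) = max b (c + (k + 1 : Nat)) := by
      rw [max_assoc]
      have : max (c + 1) (c + 1 + (k : Int)) = c + (k + 1 : Nat) := by
        rw [max_eq_right (by omega)]; push_cast; ring
      rw [this]
    have h2 : (c + 1 + (k : Int)) = c + (k + 1 : Nat) := by push_cast; ring
    have h3 : (p + 1 + (k : Int)) = p + (k + 1 : Nat) := by push_cast; ring
    rw [h1, h2, h3]

lemma scan_offset (l : List Int) :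
    ∀ (x b c : Int) (pr : Option Int),
      (l.foldl scanStep (max x b, c, pr)).1 = max x (l.foldl scanStep (b, c, pr)).1 := by
  induction l with
  | nil => intro x b c pr; rfl
  | cons v t ih =>
    intro x b c pr
    simp only [List.foldl_cons, scanStep, if_gt_eq_max]
    rw [max_assoc]
    exact ih x (max b _) _ _

lemma decomp : ∀ (L : List Int), L.Pairwise (· < ·) →
    L = [] ∨ ∃ (a : Int) (k : Nat) (rest : List Int), 1 ≤ k ∧ L = block a k ++ rest ∧
      (∀ y ∈ rest, a + k < y) ∧ rest.Pairwise (· < ·) := by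
  intro L hL
  induction L with
  | nil => exact Or.inl rfl
  | cons a xs ih =>
    right
    have hlt : ∀ y ∈ xs, a < y := (List.pairwise_cons.mp hL).1
    have hxs : xs.Pairwise (· < ·) := (List.pairwise_cons.mp hL).2
    rcases ih hxs with rfl | ⟨a', k', rest', hk', rfl, hrest', hrp'⟩
    · refine ⟨a, 1, [], le_refl 1, ?_, by simp, List.Pairwise.nil⟩
      simp [block]
    · by_cases hcons : a' = a + 1
      · subst hcons
        refine ⟨a, k' + 1, rest', by omega, ?_, ?_, hrp'⟩
        · simp [block]
        · intro y hy
          have := hrest' y hy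
          push_cast
          push_cast at this
          omega
      · have ha' : a < a' := by
          have : a' ∈ block a' k' ++ rest' := by
            cases k' with
            | zero => omega
            | succ k'' => simp [block]
          exact hlt a' this
        refine ⟨a, 1, block a' k' ++ rest', le_refl 1, by simp [block], ?_, hxs⟩
        intro y hy
        rcases List.mem_append.mp hy with hy | hy
        · have := (mem_block k' a' y).mp hy
          push_cast
          omega
        · have := hrest' y hy
          have hk0 : (0 : Int) ≤ k' := by positivity
          push_cast
          omega

lemma length_block (k : Nat) : ∀ a : Int, (block a k).length = k := by
  induction k with
  | zero => intro a; rfl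
  | succ k ih => intro a; simp [block, ih]

lemma stepA_congr {s t : List Int} (h : ∀ x : Int, x ∈ s ↔ x ∈ t) (acc i : Int) :
    stepA s acc i = stepA t acc i := by
  simp only [stepA, runLen_congr h, h (i - 1)]

lemma main_lemma (n : Nat) : ∀ (L : List Int), L.length ≤ n → L.Pairwise (· < ·) →
    L.foldl (stepA L) 0 = (L.foldl scanStep (0, 0, none)).1 := by
  induction n with
  | zero =>
    intro L hlen _
    have : L = [] := List.eq_nil_of_length_eq_zero (by omega)
    subst this; rfl
  | succ n ih =>
    intro L hlen hp
    rcases decomp L hp with rfl | ⟨a, k, rest, hk, rfl, hrest, hrp⟩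
    · rfl
    obtain ⟨k', rfl⟩ : ∃ k', k = k' + 1 := ⟨k - 1, by omega⟩
    have hkc : ((k' + 1 : Nat) : Int) = (k' : Int) + 1 := by push_cast; ring
    -- membership in L
    have memL : ∀ y : Int, y ∈ block a (k' + 1) ++ rest ↔ (a ≤ y ∧ y < a + (k' + 1)) ∨ y ∈ rest := by
      intro y
      simp [List.mem_append, mem_block, hkc]
    have hrest' : ∀ y ∈ rest, a + (k' : Int) + 1 < y := by
      intro y hy
      have := hrest y hy
      omega
    -- a is the minimum, so a - 1 is not in L
    have hamin : (a - 1) ∉ block a (k' + 1) ++ rest := by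
      rw [memL]
      intro hcon
      rcases hcon with ⟨hc1, hc2⟩ | hmem
      · omega
      · have := hrest' _ hmem
        omega
    -- the run starting at a has length k' + 1
    have hrunA : runLen (block a (k' + 1) ++ rest) a = k' := by
      refine runLen_eq_of ?_ ?_
      · intro j h1 h2
        rw [memL]
        left
        constructor <;> [omega; (push_cast; omega)]
      · rw [memL]
        intro hcon
        rcases hcon with ⟨hc1, hc2⟩ | hmem
        · omega
        · have := hrest' _ hmem
          omega
    -- ===== A side =====
    have hblockA : (block a (k' + 1)).foldl (stepA (block a (k' + 1) ++ rest)) 0 = max 0 (1 + (k' : Int)) := by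
      have h0 : stepA (block a (k' + 1) ++ rest) 0 a = max 0 (1 + (k' : Int)) := by
        simp [stepA, hamin, hrunA]
      have hskip : (block (a + 1) k').foldl (stepA (block a (k' + 1) ++ rest)) (stepA (block a (k' + 1) ++ rest) 0 a) = stepA (block a (k' + 1) ++ rest) 0 a := by
        rw [PySem.List.foldl_congr_mem (g := fun acc _ => acc), PySem.List.foldl_ignore]
        intro acc x hx
        have hxb := (mem_block k' (a + 1) x).mp hx
        have hx1 : (x - 1) ∈ block a (k' + 1) ++ rest := by
          rw [memL]; left; constructor <;> [omega; (push_cast; omega)]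
        simp [stepA, hx1]
      show ((a :: block (a + 1) k').foldl (stepA (block a (k' + 1) ++ rest)) 0) = max 0 (1 + (k' : Int))
      rw [List.foldl_cons, hskip, h0]
    have hAside : (block a (k' + 1) ++ rest).foldl (stepA (block a (k' + 1) ++ rest)) 0
        = max (1 + (k' : Int)) (rest.foldl (stepA rest) 0) := by
      rw [List.foldl_append, hblockA]
      rw [PySem.List.foldl_congr_mem (g := stepA rest)]
      · rw [max_comm, stepA_maxPull]
      · intro acc i hi
        have hiv := hrest' i hi
        have hmemi : ∀ x : Int, a + (k' : Int) + 1 ≤ x → (x ∈ block a (k' + 1) ++ rest ↔ x ∈ rest) := by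
          intro x hx
          rw [memL]
          constructor
          · rintro (h1 | h1)
            · exfalso; omega
            · exact h1
          · exact fun h1 => Or.inr h1
        have h1 : ((i - 1) ∈ block a (k' + 1) ++ rest) ↔ ((i - 1) ∈ rest) := hmemi _ (by omega)
        have h2 : runLen (block a (k' + 1) ++ rest) i = runLen rest i := by
          refine runLen_eq_of ?_ ?_
          · intro j hj1 hj2
            rw [hmemi _ (by omega)]
            exact runLen_mem rest i hj1 hj2
          · rw [hmemi _ (by omega)]
            exact runLen_notMem rest i
        simp only [stepA, h2]
        simp only [h1]
    -- ===== B side =====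
    have hstep0 : scanStep (0, 0, none) a = (1, 1, some a) := by
      simp [scanStep]
    have hBblock : (block a (k' + 1) ++ rest).foldl scanStep (0, 0, none)
        = rest.foldl scanStep (1 + (k' : Int), 1 + (k' : Int), some (a + (k' : Int))) := by
      have hcons : block a (k' + 1) ++ rest = a :: (block (a + 1) k' ++ rest) := by simp [block]
      rw [hcons, List.foldl_cons, hstep0, scan_block k' rest 1 1 a le_rfl]
      rw [max_eq_right (by omega)]
    have hIH : rest.foldl (stepA rest) 0 = (rest.foldl scanStep (0, 0, none)).1 := by
      refine ih rest ?_ hrp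
      have h := hlen
      rw [List.length_append, length_block] at h
      omega
    rw [hAside, hBblock, hIH]
    rcases rest with _ | ⟨v, t⟩
    · simp only [List.foldl_nil]
      exact max_eq_left (by omega)
    · have hv : a + (k' : Int) + 1 < v := hrest' v (by simp)
      have hstepv : scanStep (1 + (k' : Int), 1 + (k' : Int), some (a + (k' : Int))) v
          = (1 + (k' : Int), 1, some v) := by
        simp only [scanStep]
        rw [if_neg (by omega), if_neg (by omega)]
      have hstepv0 : scanStep (0, 0, none) v = (1, 1, some v) := by
        simp [scanStep]
      rw [List.foldl_cons, List.foldl_cons, hstepv, hstepv0]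
      have hK1 : ((1 + (k' : Int), 1, some v) : Int × Int × Option Int)
          = (max (1 + (k' : Int)) 1, 1, some v) := by
        rw [max_eq_left (by omega)]
      rw [hK1, scan_offset]

-- ===== VERDICT (by name: the statement is the Claim_ definition above) =====
theorem longestStr_spec : Claim_equal_longestStr := by
  intro strs _ _
  unfold Spec_longestStr longestStr longestStr_alt
  simp only []
  set S : PySem.Set Int := PySem.Set.ofList (strs.map pyOrd) with hS
  have hset : strs.foldl (fun s st => PySem.Set.add s (pyOrd st)) PySem.Set.empty = S := by
    rw [hS, PySem.Set.ofList_eq_foldl, List.foldl_map]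
    rfl
  rw [hset]
  set L : List Int := PySem.List.sorted S (fun x => x) false with hLdef
  have hperm : S.Perm L := (PySem.List.sorted_perm S (fun x => x) false).symm
  have hmem : ∀ x : Int, x ∈ S ↔ x ∈ L := by
    intro x
    rw [hLdef, PySem.List.mem_sorted]
  -- replace the while loop by its run length
  have h1 : S.foldl (fun longest i =>
      if (i - 1) ∉ S then max longest (whileA S S.length i 1).2 else longest) 0
      = S.foldl (stepA S) 0 := by
    refine PySem.List.foldl_congr_mem _ _ _ _ ?_
    intro acc i _
    have hw : (whileA S S.length i 1).2 = 1 + (runLen S i : Int) := by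
      rw [whileA_spec S (runLen S i) i S.length 1
        (fun j hj1 hj2 => runLen_mem S i hj1 hj2) (runLen_notMem S i) (runLen_le_length S i)]
    rw [hw]
    rfl
  have h2 : L.foldl (stepA S) 0 = L.foldl (stepA L) 0 :=
    PySem.List.foldl_congr_mem _ _ _ _ (fun acc i _ => stepA_congr hmem acc i)
  rw [h1, stepA_perm hperm]
  exact h2.trans
    (main_lemma L.length L le_rfl (PySem.List.sorted_ofList_pairwise_lt (strs.map pyOrd)))
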